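-- pv_equiv track=rewrite | github.com/MdAbedin/binarysearch | 0467 Lexicographic Swap.py | solve
-- ===== SOURCE A (Python) =====
-- def solve(s):
--     if not s: return ""
--
--     s = list(s)
--     mins = []
--     cur_min = len(s)-1
--
--     for i in range(len(s)-2,-1,-1):
--         mins.append(cur_min)
--         if s[i] < s[cur_min]: cur_min = i
--
--     mins.reverse()
--
--     for i in range(len(s)-1):
--         if s[mins[i]] < s[i]:
--             s[i], s[mins[i]] = s[mins[i]], s[i]
--             return "".join(s)
--
--     return "".join(s)
-- ===== SOURCE B (Python) =====
-- def solve(s):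
--     if not s: return ""
--
--     t = list(s)
--     n = len(t)
--
--     for i in range(n - 1):
--         best = i + 1
--         for j in range(i + 2, n):
--             if t[j] <= t[best]:
--                 best = j
--         if t[best] < t[i]:
--             t[i], t[best] = t[best], t[i]
--             return "".join(t)
--
--     return "".join(t)
-- ===== Notes on version B (the rewrite author's own statement) =====
-- stated objective: simpler
-- what changed: Replaces A's precomputed right-to-left suffix-minimum table (mins) by a direct left-to-right inner rescan of the suffix for each position, returning on the first improving swap.
import Mathlib
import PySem

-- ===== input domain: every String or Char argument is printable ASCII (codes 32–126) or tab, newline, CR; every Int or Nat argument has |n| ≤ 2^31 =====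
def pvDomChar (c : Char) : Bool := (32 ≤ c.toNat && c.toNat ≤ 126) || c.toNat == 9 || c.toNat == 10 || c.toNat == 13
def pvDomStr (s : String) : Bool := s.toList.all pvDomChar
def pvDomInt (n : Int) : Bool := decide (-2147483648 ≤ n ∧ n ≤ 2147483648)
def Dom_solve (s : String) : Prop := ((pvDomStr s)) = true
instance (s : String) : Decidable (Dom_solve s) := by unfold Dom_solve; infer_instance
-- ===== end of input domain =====

-- B replaces A's precomputed suffix-minimum table by a per-position rescan of the
-- suffix (simpler, no auxiliary table); same return value for every string.

-- ===== PORT A =====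
-- first loop: for i in range(len(s)-2,-1,-1): mins.append(cur_min); if s[i] < s[cur_min]: cur_min = i
-- countdown recursion; the first argument k is i+1 (k = k'+1 processes index i = k').
def solveMinsLoop (cs : List Char) : Nat → List Nat → Nat → List Nat × Nat
  | 0, mins, cur => (mins, cur)
  | k+1, mins, cur =>
      solveMinsLoop cs k (mins ++ [cur])
        (if cs.getD k ' ' < cs.getD cur ' ' then k else cur)

-- second loop: for i in range(len(s)-1): if s[mins[i]] < s[i]: swap; return "".join(s)
-- fuel = number of remaining iterations (len(s)-1-i), i the current index
def solveSwapLoop (cs : List Char) (mins : List Nat) : Nat → Nat → List Char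
  | 0, _i => cs
  | k+1, i =>
      if cs.getD (mins.getD i 0) ' ' < cs.getD i ' ' then
        (cs.set i (cs.getD (mins.getD i 0) ' ')).set (mins.getD i 0) (cs.getD i ' ')
      else solveSwapLoop cs mins k (i + 1)

def solve (s : String) : String :=
  if s.toList = [] then "" else
  let cs := s.toList
  let mins := (solveMinsLoop cs (cs.length - 1) [] (cs.length - 1)).1.reverse
  String.mk (solveSwapLoop cs mins (cs.length - 1) 0)

-- ===== PORT B =====
-- inner loop: best = i+1; for j in range(i+2, n): if t[j] <= t[best]: best = j
-- fuel = n - j remaining iterations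
def altInner (cs : List Char) : Nat → Nat → Nat → Nat
  | 0, best, _j => best
  | k+1, best, j => altInner cs k (if cs.getD j ' ' ≤ cs.getD best ' ' then j else best) (j + 1)

-- outer loop with the early-return swap; fuel = n-1-i remaining iterations
def altOuter (cs : List Char) : Nat → Nat → List Char
  | 0, _i => cs
  | k+1, i =>
      let best := altInner cs (cs.length - (i+2)) (i+1) (i+2)
      if cs.getD best ' ' < cs.getD i ' ' then
        (cs.set i (cs.getD best ' ')).set best (cs.getD i ' ')
      else altOuter cs k (i + 1)

def solve_alt (s : String) : String :=
  if s.toList = [] then "" else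
  String.mk (altOuter s.toList (s.toList.length - 1) 0)

-- ===== PRECONDITION & SPEC =====
def Spec_solve (s : String) (out : String) : Prop := out = solve_alt s
instance (s : String) (out : String) : Decidable (Spec_solve s out) := by unfold Spec_solve; infer_instance

-- ===== CLAIM (what is proved, stated in full; the proofs are below) =====
def Claim_equal_solve : Prop := ∀ (s : String), Dom_solve s → Spec_solve s (solve s)

-- ===== LEMMAS AND PROOFS =====

-- k is the rightmost minimum position of cs over the index interval [a, m)
def RMin (cs : List Char) (a m k : Nat) : Prop :=
  a ≤ k ∧ k < m ∧
  (∀ l, a ≤ l → l < m → cs.getD k ' ' ≤ cs.getD l ' ') ∧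
  (∀ l, k < l → l < m → cs.getD k ' ' < cs.getD l ' ')

theorem RMin_unique {cs : List Char} {a m k₁ k₂ : Nat}
    (h₁ : RMin cs a m k₁) (h₂ : RMin cs a m k₂) : k₁ = k₂ := by
  obtain ⟨ha₁, hm₁, hmin₁, hstr₁⟩ := h₁
  obtain ⟨ha₂, hm₂, hmin₂, hstr₂⟩ := h₂
  rcases Nat.lt_trichotomy k₁ k₂ with h | h | h
  · exact absurd (hstr₁ k₂ h hm₂) (not_lt.mpr (hmin₂ k₁ ha₁ hm₁))
  · exact h
  · exact absurd (hstr₂ k₁ h hm₁) (not_lt.mpr (hmin₁ k₂ ha₂ hm₂))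

-- suffix rightmost-argmin: the value A's cur_min holds just before processing index k-1;
-- f is the fuel cs.length - 1 - k
def suffArgmin (cs : List Char) : Nat → Nat → Nat
  | 0, k => k
  | f+1, k =>
      if cs.getD k ' ' < cs.getD (suffArgmin cs f (k+1)) ' ' then k
      else suffArgmin cs f (k+1)

theorem suffArgmin_spec (cs : List Char) (f : Nat) :
    ∀ k, k < cs.length → f = cs.length - 1 - k →
      RMin cs k cs.length (suffArgmin cs f k) := by
  induction f with
  | zero =>
      intro k hk hf
      simp only [suffArgmin]
      refine ⟨le_refl k, hk, ?_, ?_⟩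
      · intro l hal hlm
        have : l = k := by omega
        subst this; exact le_refl _
      · intro l hkl hlm; omega
  | succ f ih =>
      intro k hk hf
      have hk1 : k + 1 < cs.length := by omega
      obtain ⟨ha, hm, hmin, hstr⟩ := ih (k+1) hk1 (by omega)
      simp only [suffArgmin]
      split_ifs with hlt
      · refine ⟨le_refl k, hk, ?_, ?_⟩
        · intro l hal hlm
          rcases Nat.eq_or_lt_of_le hal with rfl | hgt
          · exact le_refl _
          · exact le_of_lt (lt_of_lt_of_le hlt (hmin l hgt hlm))
        · intro l hkl hlm
          exact lt_of_lt_of_le hlt (hmin l hkl hlm)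
      · refine ⟨Nat.le_of_succ_le ha, hm, ?_, hstr⟩
        intro l hal hlm
        rcases Nat.eq_or_lt_of_le hal with rfl | hgt
        · exact le_of_not_gt hlt
        · exact hmin l hgt hlm

theorem altInner_spec (cs : List Char) (f : Nat) :
    ∀ a j best, RMin cs a j best → j ≤ cs.length → f = cs.length - j →
      RMin cs a cs.length (altInner cs f best j) := by
  induction f with
  | zero =>
      intro a j best hb hj hf
      have : j = cs.length := by omega
      subst this
      exact hb
  | succ f ih =>
      intro a j best hb hj hf
      have hjlt : j < cs.length := by omega
      obtain ⟨ha, hm, hmin, hstr⟩ := hb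
      simp only [altInner]
      refine ih a (j+1) _ ?_ (by omega) (by omega)
      split_ifs with hle
      · refine ⟨by omega, by omega, ?_, ?_⟩
        · intro l hal hlm
          rcases Nat.lt_or_ge l j with hlj | hjl
          · exact le_trans hle (hmin l hal hlj)
          · have : l = j := by omega
            subst this; exact le_refl _
        · intro l hkl hlm; omega
      · refine ⟨ha, by omega, ?_, ?_⟩
        · intro l hal hlm
          rcases Nat.lt_or_ge l j with hlj | hjl
          · exact hmin l hal hlj
          · have : l = j := by omega
            subst this; exact le_of_lt (lt_of_not_ge (fun hh => hle hh))
        · intro l hkl hlm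
          rcases Nat.lt_or_ge l j with hlj | hjl
          · exact hstr l hkl hlj
          · have : l = j := by omega
            subst this; exact lt_of_not_ge (fun hh => hle hh)

theorem minsLoop_acc (cs : List Char) (k : Nat) :
    ∀ mins cur, solveMinsLoop cs k mins cur =
      (mins ++ (solveMinsLoop cs k [] cur).1, (solveMinsLoop cs k [] cur).2) := by
  induction k with
  | zero => intro mins cur; simp [solveMinsLoop]
  | succ k ih =>
      intro mins cur
      simp only [solveMinsLoop]
      rw [ih (mins ++ [cur]), ih ([] ++ [cur])]
      simp

theorem minsLoop_suffArgmin (cs : List Char) (k : Nat) (hk : k < cs.length) :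
    (solveMinsLoop cs k [] (suffArgmin cs (cs.length - 1 - k) k)).1
      = (List.range k).reverse.map (fun j => suffArgmin cs (cs.length - 1 - (j+1)) (j+1)) := by
  induction k with
  | zero => simp [solveMinsLoop]
  | succ k ih =>
      simp only [solveMinsLoop]
      have hfuel : cs.length - 1 - k = (cs.length - 1 - (k+1)) + 1 := by omega
      have hstep : (if cs.getD k ' ' < cs.getD (suffArgmin cs (cs.length - 1 - (k+1)) (k+1)) ' '
          then k else suffArgmin cs (cs.length - 1 - (k+1)) (k+1))
            = suffArgmin cs (cs.length - 1 - k) k := by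
        rw [hfuel]
        simp [suffArgmin]
      rw [hstep, minsLoop_acc, ih (by omega)]
      simp [List.range_succ]

theorem mins_getD (cs : List Char) (h : cs ≠ []) (i : Nat) (hi : i < cs.length - 1) :
    ((solveMinsLoop cs (cs.length - 1) [] (cs.length - 1)).1.reverse).getD i 0
      = suffArgmin cs (cs.length - 1 - (i+1)) (i+1) := by
  have hms := minsLoop_suffArgmin cs (cs.length - 1) (by
    have := List.length_pos_iff.mpr h
    omega)
  have hinit : cs.length - 1 - (cs.length - 1) = 0 := by omega
  rw [hinit] at hms
  simp only [suffArgmin] at hms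
  rw [hms, ← List.map_reverse, List.reverse_reverse]
  have hlt : i < ((List.range (cs.length - 1)).map
      (fun j => suffArgmin cs (cs.length - 1 - (j+1)) (j+1))).length := by
    simpa using hi
  rw [List.getD_eq_getElem _ _ hlt]
  simp

theorem loops_eq (cs : List Char) (mins : List Nat)
    (hm : ∀ i, i < cs.length - 1 → mins.getD i 0 = suffArgmin cs (cs.length - 1 - (i+1)) (i+1)) :
    ∀ k i, k + i = cs.length - 1 →
      solveSwapLoop cs mins k i = altOuter cs k i := by
  intro k
  induction k with
  | zero => intro i _; rfl
  | succ k ih =>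
      intro i hki
      have hi : i < cs.length - 1 := by omega
      have hbest : altInner cs (cs.length - (i+2)) (i+1) (i+2)
          = suffArgmin cs (cs.length - 1 - (i+1)) (i+1) := by
        have h1 : RMin cs (i+1) (i+2) (i+1) := by
          refine ⟨le_refl _, by omega, ?_, ?_⟩
          · intro l h1 h2
            have : l = i+1 := by omega
            subst this; exact le_refl _
          · intro l h1 h2; omega
        exact RMin_unique
          (altInner_spec cs (cs.length - (i+2)) (i+1) (i+2) (i+1) h1 (by omega) (by omega))
          (suffArgmin_spec cs (cs.length - 1 - (i+1)) (i+1) (by omega) (by omega))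
      simp only [solveSwapLoop, altOuter, hbest, hm i hi]
      split_ifs with hc
      · rfl
      · exact ih (i+1) (by omega)

-- ===== VERDICT (by name: the statement is the Claim_ definition above) =====
theorem solve_spec : Claim_equal_solve := by
  intro s _
  unfold Spec_solve solve solve_alt
  by_cases h : s.toList = []
  · simp [h]
  · simp only [if_neg h]
    exact congrArg String.mk
      (loops_eq s.toList _ (fun i hi => mins_getD s.toList h i hi) (s.toList.length - 1) 0
        (by omega))
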